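-- pv_equiv track=rewrite | github.com/Northshoot/dOPE | dope/cache/CacheModelNaive.py | encoding_cmp
-- ===== SOURCE A (Python) =====
-- def encoding_cmp(enc1, enc2):
--   # Handle empty encoding
--   if enc1 == []:
--     if enc2 == []:
--       return 0
--     elif enc2[0] == 0:
--       return 1
--     else:
--       return -1
--   if enc2 == []:
--     if enc1 == []:
--       return 0
--     elif enc1[0] == 0:
--       return -1
--     else:
--       return 1
--
--   if enc1[0] == enc2[0]:
--     if len(enc1) == 1 and len(enc2) == 1:
--       return 0
--     elif len(enc1) == 1:
--       if enc2[1] == 1: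
--         return -1
--       else:
--         return 1
--     elif len(enc2) == 1:
--       if enc1[1] == 1:
--         return 1
--       else:
--         return -1
--     else:
--       return encoding_cmp(enc1[1:],enc2[1:])
--   if enc1[0] != enc2[0]:
--     if enc1[0] == 0:
--       return -1
--     else:
--       return 1
-- ===== SOURCE B (Python) =====
-- def encoding_cmp(enc1, enc2):
--     if not enc1 or not enc2:
--         if not enc1 and not enc2:
--             return 0
--         if not enc1:
--             return 1 if enc2[0] == 0 else -1
--         return -1 if enc1[0] == 0 else 1
--     n1, n2 = len(enc1), len(enc2)
--     i = 0
--     while True: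
--         if enc1[i] != enc2[i]:
--             return -1 if enc1[i] == 0 else 1
--         if i == n1 - 1 and i == n2 - 1:
--             return 0
--         if i == n1 - 1:
--             return -1 if enc2[i + 1] == 1 else 1
--         if i == n2 - 1:
--             return 1 if enc1[i + 1] == 1 else -1
--         i += 1
-- ===== Notes on version B (the rewrite author's own statement) =====
-- stated objective: faster
-- what changed: Replaced A's recursion on list slices (each step copies both tails) with a single index-based while loop over the original lists.
import Mathlib
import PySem

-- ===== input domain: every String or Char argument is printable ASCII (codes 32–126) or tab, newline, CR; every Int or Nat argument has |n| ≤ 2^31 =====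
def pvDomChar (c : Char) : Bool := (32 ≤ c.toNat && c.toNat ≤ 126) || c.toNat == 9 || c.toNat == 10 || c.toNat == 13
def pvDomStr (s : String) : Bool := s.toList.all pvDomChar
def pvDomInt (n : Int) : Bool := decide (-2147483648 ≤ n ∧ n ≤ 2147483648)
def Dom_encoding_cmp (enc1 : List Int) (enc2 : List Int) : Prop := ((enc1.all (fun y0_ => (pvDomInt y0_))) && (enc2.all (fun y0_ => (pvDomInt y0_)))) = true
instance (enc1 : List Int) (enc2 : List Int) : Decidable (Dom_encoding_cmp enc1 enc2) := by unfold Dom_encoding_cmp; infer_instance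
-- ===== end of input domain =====

-- B replaces A's recursion on list slices (which copies both tails each step) with a
-- single index-based loop over the original lists: O(n) instead of O(n^2).

-- ===== PORT A =====
-- A's recursion on enc1[1:], enc2[1:] (only reached when both tails are nonempty),
-- with the empty/last-element special cases in A's branch order.
def encoding_cmp (enc1 : List Int) (enc2 : List Int) : Int :=
  match enc1, enc2 with
  | [], [] => 0
  | [], b :: _ => if b = 0 then 1 else -1
  | a :: _, [] => if a = 0 then -1 else 1
  | a :: t1, b :: t2 =>
    if a = b then
      match t1, t2 with
      | [], [] => 0
      | [], y :: _ => if y = 1 then -1 else 1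
      | x :: _, [] => if x = 1 then 1 else -1
      | _ :: _, _ :: _ => encoding_cmp t1 t2
    else
      if a = 0 then -1 else 1

-- ===== PORT B =====
-- B's `while True` loop over index i; fuel = enc1.length makes it total in Lean
-- (the Python loop always returns before i reaches len(enc1)); fuel-0 value is unreachable.
def encodingCmpAltLoop (enc1 enc2 : List Int) (fuel i : Nat) : Int :=
  match fuel with
  | 0 => 0
  | f + 1 =>
    let a := enc1.getD i 0
    let b := enc2.getD i 0
    if a ≠ b then (if a = 0 then -1 else 1)
    else if i = enc1.length - 1 ∧ i = enc2.length - 1 then 0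
    else if i = enc1.length - 1 then (if enc2.getD (i + 1) 0 = 1 then -1 else 1)
    else if i = enc2.length - 1 then (if enc1.getD (i + 1) 0 = 1 then 1 else -1)
    else encodingCmpAltLoop enc1 enc2 f (i + 1)

def encoding_cmp_alt (enc1 : List Int) (enc2 : List Int) : Int :=
  if enc1 = [] ∨ enc2 = [] then
    if enc1 = [] ∧ enc2 = [] then 0
    else if enc1 = [] then (if enc2.getD 0 0 = 0 then 1 else -1)
    else (if enc1.getD 0 0 = 0 then -1 else 1)
  else encodingCmpAltLoop enc1 enc2 enc1.length 0

-- ===== PRECONDITION & SPEC =====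
def Spec_encoding_cmp (enc1 : List Int) (enc2 : List Int) (out : Int) : Prop := out = encoding_cmp_alt enc1 enc2
instance (enc1 : List Int) (enc2 : List Int) (out : Int) : Decidable (Spec_encoding_cmp enc1 enc2 out) := by unfold Spec_encoding_cmp; infer_instance

-- ===== CLAIM (what is proved, stated in full; the proofs are below) =====
def Claim_equal_encoding_cmp : Prop := ∀ (enc1 : List Int) (enc2 : List Int), Dom_encoding_cmp enc1 enc2 → Spec_encoding_cmp enc1 enc2 (encoding_cmp enc1 enc2)

-- ===== LEMMAS AND PROOFS =====

-- Shifting the loop index by one over both lists' heads does not change the result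
-- (conditions at index i+1 on a::t match those at index i on t, for nonempty t).
lemma encodingCmpAltLoop_shift (a b : Int) (t1 t2 : List Int)
    (h1 : t1 ≠ []) (h2 : t2 ≠ []) :
    ∀ (f i : Nat),
      encodingCmpAltLoop (a :: t1) (b :: t2) f (i + 1) = encodingCmpAltLoop t1 t2 f i := by
  intro f
  induction f with
  | zero => intro i; rfl
  | succ f ih =>
    intro i
    have hl1 : 0 < t1.length := List.length_pos_iff.mpr h1
    have hl2 : 0 < t2.length := List.length_pos_iff.mpr h2
    simp only [encodingCmpAltLoop, List.getD_cons_succ, List.length_cons]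
    have e1 : (i + 1 = t1.length + 1 - 1) = (i = t1.length - 1) := by
      simp only [eq_iff_iff]; omega
    have e2 : (i + 1 = t2.length + 1 - 1) = (i = t2.length - 1) := by
      simp only [eq_iff_iff]; omega
    simp only [e1, e2]
    split_ifs <;> first | rfl | exact ih (i + 1)

lemma encoding_cmp_eq_alt : ∀ (enc1 enc2 : List Int),
    encoding_cmp enc1 enc2 = encoding_cmp_alt enc1 enc2 := by
  intro enc1
  induction enc1 with
  | nil =>
    intro enc2
    cases enc2 with
    | nil => rfl
    | cons b t2 => simp [encoding_cmp, encoding_cmp_alt]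
  | cons a t1 ih =>
    intro enc2
    cases enc2 with
    | nil => simp [encoding_cmp, encoding_cmp_alt]
    | cons b t2 =>
      have hne1 : (a :: t1) ≠ ([] : List Int) := by simp
      have hne2 : (b :: t2) ≠ ([] : List Int) := by simp
      rw [encoding_cmp_alt]
      simp only [hne1, hne2, or_self, if_false]
      -- unfold one loop step at i = 0
      rw [show (a :: t1).length = t1.length + 1 from rfl, encodingCmpAltLoop]
      simp only [List.getD_cons_zero, List.length_cons]
      by_cases hab : a = b
      · subst hab
        rw [if_neg (show ¬ (a ≠ a) by simp)]
        cases t1 with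
        | nil =>
          cases t2 with
          | nil => simp [encoding_cmp]
          | cons y t2' => simp [encoding_cmp]
        | cons x t1' =>
          cases t2 with
          | nil => simp [encoding_cmp]
          | cons y t2' =>
            have c1 : ¬ ((0 : Nat) = (x :: t1').length + 1 - 1 ∧ (0 : Nat) = (y :: t2').length + 1 - 1) := by
              simp
            have c2 : ¬ ((0 : Nat) = (x :: t1').length + 1 - 1) := by simp
            have c3 : ¬ ((0 : Nat) = (y :: t2').length + 1 - 1) := by simp
            rw [if_neg c1, if_neg c2, if_neg c3,
              encodingCmpAltLoop_shift a a (x :: t1') (y :: t2') (by simp) (by simp)]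
            have : encoding_cmp (a :: x :: t1') (a :: y :: t2') = encoding_cmp (x :: t1') (y :: t2') := by
              simp [encoding_cmp]
            rw [this, ih (y :: t2'), encoding_cmp_alt]
            simp [encodingCmpAltLoop]
      · simp [encoding_cmp, hab]

-- ===== VERDICT (by name: the statement is the Claim_ definition above) =====
theorem encoding_cmp_spec : Claim_equal_encoding_cmp := by
  intro enc1 enc2 _
  unfold Spec_encoding_cmp
  exact encoding_cmp_eq_alt enc1 enc2
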